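-- pv_equiv track=rewrite | github.com/chenxu0602/LeetCode | 401.binary-watch.py | generateHash
-- ===== SOURCE A (Python) =====
-- from collections import defaultdict
--
-- def generateHash(num):
--     num_hash = defaultdict(list)
--     while num >= 0:
--         n = num
--         count = 0
--
--         while n > 0:
--             count += (n & 1)
--             n  >>= 1
--
--         num_hash[count].append(num)
--
--         num = num - 1
--
--     return num_hash
-- ===== SOURCE B (Python) =====
-- from collections import defaultdict
--
-- def generateHash(num):
--     pc = [0]
--     for i in range(1, num + 1):
--         pc.append(pc[i >> 1] + (i & 1))
--     res = defaultdict(list)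
--     for i in range(num, -1, -1):
--         res[pc[i]].append(i)
--     return res
-- ===== Notes on version B (the rewrite author's own statement) =====
-- stated objective: faster
-- what changed: replaces the per-number bit-extraction inner while-loop with a popcount DP table pc[i] = pc[i>>1] + (i&1) built in one linear pass, then buckets numbers descending by table lookup
import Mathlib
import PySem

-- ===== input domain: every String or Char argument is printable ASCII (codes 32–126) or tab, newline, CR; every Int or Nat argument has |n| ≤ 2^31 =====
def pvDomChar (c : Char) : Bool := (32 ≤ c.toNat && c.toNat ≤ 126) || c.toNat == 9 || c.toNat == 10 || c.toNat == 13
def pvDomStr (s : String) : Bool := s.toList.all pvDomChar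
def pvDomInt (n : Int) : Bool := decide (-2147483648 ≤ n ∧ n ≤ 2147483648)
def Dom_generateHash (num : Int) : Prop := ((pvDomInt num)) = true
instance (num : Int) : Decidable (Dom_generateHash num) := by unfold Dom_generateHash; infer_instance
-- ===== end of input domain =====

-- B replaces A's per-number bit-extraction inner loop with a popcount DP table
-- pc[i] = pc[i >> 1] + (i & 1) built in one pass, then buckets i = num..0 by table lookup (objective: faster).

-- ===== PORT A =====
-- inner 'while n > 0: count += n & 1; n >>= 1'
def pvPcLoop (n count : Int) : Int :=
  if 0 < n then pvPcLoop (n.shiftRight 1) (count + n.land 1) else count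
termination_by n.toNat
decreasing_by
  have h2 : n.shiftRight 1 = n / 2 := by simpa using Int.shiftRight_eq_div_pow n 1
  omega

-- outer 'while num >= 0' loop over the defaultdict(list)
def pvOuterA (num : Int) (d : PySem.Dict Int (List Int)) : PySem.Dict Int (List Int) :=
  if 0 ≤ num then
    pvOuterA (num - 1) (d.modify (pvPcLoop num 0) [] (· ++ [num]))
  else d
termination_by (num + 1).toNat
decreasing_by omega

def generateHash (num : Int) : List (Int × List Int) :=
  (pvOuterA num PySem.Dict.empty).items

-- ===== PORT B =====
-- 'pc = [0]; for i in range(1, num+1): pc.append(pc[i >> 1] + (i & 1))'  (index always in range)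
def pvBuildPc (num : Int) : List Int :=
  (PySem.List.pyRange 1 (num + 1) 1).foldl
    (fun pc i => pc ++ [PySem.List.pyGetD pc (i.shiftRight 1) 0 + i.land 1]) [0]

-- 'res = {}; for i in range(num, -1, -1): res.setdefault(pc[i], []).append(i)'
def generateHash_alt (num : Int) : List (Int × List Int) :=
  let pc := pvBuildPc num
  ((PySem.List.pyRange num (-1) (-1)).foldl
    (fun d i => d.modify (PySem.List.pyGetD pc i 0) [] (· ++ [i]))
    PySem.Dict.empty).items

-- ===== PRECONDITION & SPEC =====
def Spec_generateHash (num : Int) (out : List (Int × List Int)) : Prop := out = generateHash_alt num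
instance (num : Int) (out : List (Int × List Int)) : Decidable (Spec_generateHash num out) := by unfold Spec_generateHash; infer_instance

-- ===== CLAIM (what is proved, stated in full; the proofs are below) =====
def Claim_equal_generateHash : Prop := ∀ (num : Int), Dom_generateHash num → Spec_generateHash num (generateHash num)

-- ===== LEMMAS AND PROOFS =====

theorem pvShiftRight_one (n : Int) : n.shiftRight 1 = n / 2 := by
  simpa using Int.shiftRight_eq_div_pow n 1

-- pvPcLoop is 'count plus the popcount of n'
theorem pvPcLoop_add (n c : Int) : pvPcLoop n c = c + pvPcLoop n 0 := by
  rw [pvPcLoop]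
  conv_rhs => rw [pvPcLoop]
  split_ifs with hn
  · rw [pvPcLoop_add (n.shiftRight 1) (c + n.land 1),
        pvPcLoop_add (n.shiftRight 1) (0 + n.land 1)]
    ring
  · ring
termination_by n.toNat
decreasing_by
  all_goals
    have := pvShiftRight_one n
    omega

-- the DP table has length m+1 and holds pvPcLoop j 0 at every index j ≤ m
theorem pvBuildPc_spec (m : Nat) :
    ((PySem.List.pyRange 1 ((m : Int) + 1) 1).foldl
      (fun pc i => pc ++ [PySem.List.pyGetD pc (i.shiftRight 1) 0 + i.land 1]) [0]).length = m + 1 ∧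
    ∀ j : Int, 0 ≤ j → j ≤ (m : Int) →
      PySem.List.pyGetD
        ((PySem.List.pyRange 1 ((m : Int) + 1) 1).foldl
          (fun pc i => pc ++ [PySem.List.pyGetD pc (i.shiftRight 1) 0 + i.land 1]) [0]) j 0
        = pvPcLoop j 0 := by
  induction m with
  | zero =>
    rw [PySem.List.pyRange_one_eq_nil (by norm_num)]
    constructor
    · simp
    · intro j h0 h1
      have hj : j = 0 := by omega
      subst hj
      simp only [List.foldl_nil]
      rw [PySem.List.pyGetD_zero_cons, pvPcLoop]
      simp
  | succ m ih =>
    have hcast : ((m + 1 : Nat) : Int) + 1 = ((m : Int) + 1) + 1 := by push_cast; ring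
    rw [hcast, PySem.List.pyRange_one_succ_right (by omega), List.foldl_append]
    simp only [List.foldl_cons, List.foldl_nil]
    obtain ⟨ihlen, ihget⟩ := ih
    set L := (PySem.List.pyRange 1 ((m : Int) + 1) 1).foldl
      (fun pc i => pc ++ [PySem.List.pyGetD pc (i.shiftRight 1) 0 + i.land 1]) [0] with hL
    refine ⟨by simp [ihlen], ?_⟩
    intro j h0 h1
    have hsr : ((m : Int) + 1).shiftRight 1 = ((m : Int) + 1) / 2 := pvShiftRight_one _
    by_cases hj : j ≤ (m : Int)
    · rw [PySem.List.pyGetD_eq_getElem _ _ h0 (by simp only [List.length_append, List.length_singleton, ihlen]; push_cast; omega),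
          List.getElem_append_left (by omega),
          ← PySem.List.pyGetD_eq_getElem _ _ h0 (by omega)]
      exact ihget j h0 hj
    · have hj' : j = (m : Int) + 1 := by omega
      subst hj'
      rw [PySem.List.pyGetD_eq_getElem _ _ h0 (by simp only [List.length_append, List.length_singleton, ihlen]; push_cast; omega)]
      have hidx : ((m : Int) + 1).toNat = L.length := by omega
      rw [List.getElem_append_right (by omega)]
      simp only [hidx, Nat.sub_self, List.getElem_singleton]
      have hb0 : 0 ≤ ((m : Int) + 1).shiftRight 1 := by rw [hsr]; omega
      have hb1 : ((m : Int) + 1).shiftRight 1 ≤ (m : Int) := by rw [hsr]; omega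
      rw [ihget (((m : Int) + 1).shiftRight 1) hb0 hb1]
      have hrec : pvPcLoop ((m : Int) + 1) 0
          = ((m : Int) + 1).land 1 + pvPcLoop (((m : Int) + 1).shiftRight 1) 0 := by
        conv_lhs => rw [pvPcLoop]
        rw [if_pos (by omega : (0 : Int) < (m : Int) + 1), pvPcLoop_add]
        ring
      omega

theorem pvBuildPc_get (num j : Int) (h0 : 0 ≤ j) (h1 : j ≤ num) :
    PySem.List.pyGetD (pvBuildPc num) j 0 = pvPcLoop j 0 := by
  have hnum : num = ((num.toNat : Nat) : Int) := by omega
  rw [pvBuildPc, hnum]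
  exact (pvBuildPc_spec num.toNat).2 j h0 (by omega)

-- the descending bucket fold equals A's while loop
theorem pvFold_eq_outer (num k : Int) (hk : k ≤ num) (d : PySem.Dict Int (List Int)) :
    (PySem.List.pyRange k (-1) (-1)).foldl
      (fun d i => d.modify (PySem.List.pyGetD (pvBuildPc num) i 0) [] (· ++ [i])) d
    = pvOuterA k d := by
  by_cases h : 0 ≤ k
  · rw [PySem.List.pyRange_neg_one_cons (by omega : (-1 : Int) < k)]
    simp only [List.foldl_cons]
    rw [pvBuildPc_get num k h hk,
        pvFold_eq_outer num (k - 1) (by omega)]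
    conv_rhs => rw [pvOuterA]
    rw [if_pos h]
  · rw [PySem.List.pyRange_neg_one_eq_nil (by omega), pvOuterA, if_neg h]
    simp
termination_by (k + 1).toNat
decreasing_by omega

-- ===== VERDICT (by name: the statement is the Claim_ definition above) =====
theorem generateHash_spec : Claim_equal_generateHash := by
  intro num _
  show generateHash num = generateHash_alt num
  exact congrArg PySem.Dict.items (pvFold_eq_outer num num le_rfl PySem.Dict.empty).symm
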